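-- pv_equiv track=rewrite | github.com/seongpyoHong/algorithm | 2020/크레인 인형뽑기.py | solution
-- ===== SOURCE A (Python) =====
-- def solution(board, moves):
--     bucket = []
--     for i in range(0,len(board)) :
--         s = []
--         for j in range(len(board)-1,-1,-1) :
--             if (board[j][i] != 0) :
--                 s.append(board[j][i])
--         bucket.append(s)
--
--     result_bucket = []
--     result = 0
--     for i in moves :
--         if (len(bucket[i-1]) != 0) :
--             item = bucket[i-1].pop()
--             if (len(result_bucket) == 0 or result_bucket[-1] != item) :
--                 result_bucket.append(item)
--             elif (result_bucket[-1] == item) :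
--                 result_bucket.pop()
--                 result += 1;
--     return result*2;
-- ===== SOURCE B (Python) =====
-- def solution(board, moves):
--     n = len(board)
--     ptrs = [0] * n
--     stack = []
--     result = 0
--     for m in moves:
--         c = m - 1
--         r = ptrs[c]
--         while r < n and board[r][c] == 0:
--             r += 1
--         if r < n:
--             ptrs[c] = r + 1
--             item = board[r][c]
--             if stack and stack[-1] == item:
--                 stack.pop()
--                 result += 2
--             else:
--                 stack.append(item)
--     return result
-- ===== Notes on version B (the rewrite author's own statement) =====
-- stated objective: alternative
-- what changed: B drops A's eager O(n^2) pre-pass that materialises every column as a popped stack; instead it keeps one integer row-pointer per column and, for each move, scans that column downward from the pointer directly in the (unmutated) board until a nonzero piece is found, feeding it into the same cancellation stack with the count kept already doubled.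
-- outside the precondition, e.g. on solution([[1, 7, 9], [1, 7, 9]], [0, 2]): A returns 2, B returns 0
import Mathlib
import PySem

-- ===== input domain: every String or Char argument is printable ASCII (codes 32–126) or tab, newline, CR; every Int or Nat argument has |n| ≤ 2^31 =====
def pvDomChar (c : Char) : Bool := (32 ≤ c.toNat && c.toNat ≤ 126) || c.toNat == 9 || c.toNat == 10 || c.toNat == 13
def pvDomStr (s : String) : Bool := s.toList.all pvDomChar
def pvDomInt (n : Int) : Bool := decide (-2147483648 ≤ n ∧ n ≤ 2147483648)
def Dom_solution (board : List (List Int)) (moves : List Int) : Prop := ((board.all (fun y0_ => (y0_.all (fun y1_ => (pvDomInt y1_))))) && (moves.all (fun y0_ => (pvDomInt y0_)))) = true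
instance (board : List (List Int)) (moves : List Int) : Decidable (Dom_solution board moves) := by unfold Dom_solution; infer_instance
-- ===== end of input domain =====

-- B replaces A's eager per-column stack pre-pass by lazy per-column row pointers over the
-- unmutated board (alternative decomposition, same cancellation-stack semantics).

-- ===== PORT A =====
-- body of A's 'for i in moves' loop; state = (bucket, result_bucket, result)
def stepA (st : List (List Int) × List Int × Int) (i : Int) : List (List Int) × List Int × Int :=
  let col := PySem.List.pyGetD st.1 (i - 1) []
  if col.length ≠ 0 then
    let item := PySem.List.pyGetD col (-1) 0          -- bucket[i-1].pop()
    let bucket' := PySem.List.pySetD st.1 (i - 1) col.dropLast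
    if st.2.1.length = 0 ∨ PySem.List.pyGetD st.2.1 (-1) 0 ≠ item then
      (bucket', st.2.1 ++ [item], st.2.2)
    else if PySem.List.pyGetD st.2.1 (-1) 0 = item then
      (bucket', st.2.1.dropLast, st.2.2 + 1)
    else (bucket', st.2.1, st.2.2)
  else st

def solution (board : List (List Int)) (moves : List Int) : Int :=
  let n : Int := board.length
  let bucket : List (List Int) :=
    (PySem.List.pyRange 0 n 1).foldl (fun bucket i =>
      bucket ++ [(PySem.List.pyRange (n - 1) (-1) (-1)).foldl (fun s j =>
        if PySem.List.pyGetD (PySem.List.pyGetD board j []) i 0 ≠ 0 then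
          s ++ [PySem.List.pyGetD (PySem.List.pyGetD board j []) i 0]
        else s) []]) []
  let st := moves.foldl stepA (bucket, ([], 0))
  st.2.2 * 2

-- ===== PORT B =====
-- the 'while r < n and board[r][c] == 0: r += 1' loop of Source B; fuel = len(board) bounds the
-- number of iterations (r only increases, the loop stops once r reaches n)
def scanB (board : List (List Int)) (c : Int) (n : Int) : Nat → Int → Int
  | 0, r => r
  | fuel + 1, r =>
    if r < n ∧ PySem.List.pyGetD (PySem.List.pyGetD board r []) c 0 = 0 then
      scanB board c n fuel (r + 1)
    else r

-- body of Source B's 'for m in moves' loop; state = (ptrs, stack, result)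
def stepB (board : List (List Int)) (st : List Int × List Int × Int) (m : Int) :
    List Int × List Int × Int :=
  let c := m - 1
  let r := scanB board c (board.length : Int) board.length (PySem.List.pyGetD st.1 c 0)
  if r < (board.length : Int) then
    let ptrs' := PySem.List.pySetD st.1 c (r + 1)
    let item := PySem.List.pyGetD (PySem.List.pyGetD board r []) c 0
    if st.2.1 ≠ [] ∧ PySem.List.pyGetD st.2.1 (-1) 0 = item then
      (ptrs', st.2.1.dropLast, st.2.2 + 2)
    else (ptrs', st.2.1 ++ [item], st.2.2)
  else st

def solution_alt (board : List (List Int)) (moves : List Int) : Int :=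
  let st := moves.foldl (stepB board) (List.replicate board.length (0 : Int), ([], 0))
  st.2.2

-- ===== PRECONDITION & SPEC =====
-- Pre_ excludes boards with a row shorter than len(board) and moves outside 1-n..n (A raises
-- IndexError on both), and the combination of a move ≤ 0 with a board row longer than
-- len(board): there A's accidental negative-index wraparound into the bucket list is an
-- unspecified corner on which B's direct per-row board indexing may read different cells.
def Pre_solution (board : List (List Int)) (moves : List Int) : Prop :=
  (∀ row ∈ board, board.length ≤ row.length) ∧
  (∀ m ∈ moves, 1 - (board.length : Int) ≤ m ∧ m ≤ (board.length : Int)) ∧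
  (∀ m ∈ moves, m ≤ 0 → ∀ row ∈ board, row.length = board.length)
instance (board : List (List Int)) (moves : List Int) : Decidable (Pre_solution board moves) := by
  unfold Pre_solution; infer_instance

def pvWitness_solution : List (List Int) × List Int := ([[0, 1], [1, 1]], [2, 1, 2])

def Spec_solution (board : List (List Int)) (moves : List Int) (out : Int) : Prop := out = solution_alt board moves
instance (board : List (List Int)) (moves : List Int) (out : Int) : Decidable (Spec_solution board moves out) := by unfold Spec_solution; infer_instance

-- ===== CLAIM (what is proved, stated in full; the proofs are below) =====
def Claim_equal_solution : Prop := ∀ (board : List (List Int)) (moves : List Int), Dom_solution board moves → Pre_solution board moves → Spec_solution board moves (solution board moves)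

-- ===== LEMMAS AND PROOFS =====

-- the value board[j][c] both programs read (total form; in range under Pre_)
def cell (board : List (List Int)) (j c : Nat) : Int := (board.getD j []).getD c 0

-- what remains of column c once rows < p have been consumed, in A's stack order
-- (topmost remaining nonzero piece last)
def colStack (board : List (List Int)) (c p : Nat) : List Int :=
  ((((List.range board.length).drop p).filter (fun j => cell board j c ≠ 0)).reverse).map
    (fun j => cell board j c)

lemma colStack_ge (board : List (List Int)) (c p : Nat) (h : board.length ≤ p) :
    colStack board c p = [] := by
  simp [colStack, List.drop_eq_nil_of_le, h]

lemma colStack_step (board : List (List Int)) (c p : Nat) (h : p < board.length) :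
    colStack board c p =
      colStack board c (p + 1) ++
        (if cell board p c ≠ 0 then [cell board p c] else []) := by
  have hdrop : (List.range board.length).drop p =
      p :: (List.range board.length).drop (p + 1) := by
    rw [List.drop_eq_getElem_cons (by simpa using h)]
    simp
  unfold colStack
  rw [hdrop]
  by_cases hz : cell board p c ≠ 0 <;> simp [hz]

-- characterisation of B's while-loop scan against the remaining column stack
lemma scan_spec (board : List (List Int)) (c : Nat) :
    ∀ (fuel p : Nat), board.length ≤ fuel + p → p ≤ board.length →
      (scanB board (c : Int) (board.length : Int) fuel (p : Int) = (board.length : Int) ∧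
        colStack board c p = []) ∨
      (∃ k : Nat, scanB board (c : Int) (board.length : Int) fuel (p : Int) = (k : Int) ∧
        p ≤ k ∧ k < board.length ∧ cell board k c ≠ 0 ∧
        colStack board c p = colStack board c (k + 1) ++ [cell board k c]) := by
  intro fuel
  induction fuel with
  | zero =>
    intro p hfp hp
    have : p = board.length := by omega
    subst this
    exact Or.inl ⟨by simp [scanB], colStack_ge _ _ _ le_rfl⟩
  | succ fuel ih =>
    intro p hfp hp
    by_cases hlt : p < board.length
    · by_cases hz : cell board p c = 0
      · have hstep : scanB board (c : Int) (board.length : Int) (fuel + 1) (p : Int) =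
            scanB board (c : Int) (board.length : Int) fuel ((p : Int) + 1) := by
          simp only [scanB]
          rw [if_pos]
          exact ⟨by exact_mod_cast hlt, by simpa [cell] using hz⟩
        have hcol : colStack board c p = colStack board c (p + 1) := by
          rw [colStack_step board c p hlt]; simp [hz]
        have := ih (p + 1) (by omega) (by omega)
        rw [hcol]
        push_cast at this ⊢
        rcases this with ⟨h1, h2⟩ | ⟨k, h1, h2, h3, h4, h5⟩
        · exact Or.inl ⟨by rw [hstep]; exact h1, h2⟩
        · exact Or.inr ⟨k, by rw [hstep]; exact h1, by omega, h3, h4, h5⟩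
      · refine Or.inr ⟨p, ?_, le_rfl, hlt, hz, ?_⟩
        · simp only [scanB]
          rw [if_neg]
          intro hcon
          exact hz (by simpa [cell] using hcon.2)
        · rw [colStack_step board c p hlt]; simp [hz]
    · have hpn : p = board.length := by omega
      subst hpn
      refine Or.inl ⟨?_, colStack_ge _ _ _ le_rfl⟩
      simp only [scanB]
      rw [if_neg]
      intro hcon
      exact absurd hcon.1 (by simp)

-- A's descending inner loop over one list of (natural) row indices
lemma fold_rows (board : List (List Int)) (i : Nat) :
    ∀ (rows : List Nat) (s0 : List Int),
      (rows.map (fun (j : Nat) => (j : Int))).foldl (fun s j =>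
          if PySem.List.pyGetD (PySem.List.pyGetD board j []) (i : Int) 0 ≠ 0 then
            s ++ [PySem.List.pyGetD (PySem.List.pyGetD board j []) (i : Int) 0]
          else s) s0 =
        s0 ++ (rows.filter (fun j => cell board j i ≠ 0)).map (fun j => cell board j i) := by
  intro rows
  induction rows with
  | nil => intro s0; simp
  | cons j rest ih =>
    intro s0
    have hcell : PySem.List.pyGetD (PySem.List.pyGetD board (j : Int) []) (i : Int) 0 =
        cell board j i := by
      simp [cell, PySem.List.pyGetD_natCast]
    simp only [List.map_cons, List.foldl_cons, hcell]
    by_cases hz : cell board j i ≠ 0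
    · rw [if_pos hz, ih]
      simp [hz]
    · rw [if_neg hz, ih]
      simp [hz]

-- A's bucket-building pre-pass produces exactly the full column stacks
lemma bucket_eq (board : List (List Int)) :
    (PySem.List.pyRange 0 (board.length : Int) 1).foldl (fun bucket i =>
      bucket ++ [(PySem.List.pyRange ((board.length : Int) - 1) (-1) (-1)).foldl (fun s j =>
        if PySem.List.pyGetD (PySem.List.pyGetD board j []) i 0 ≠ 0 then
          s ++ [PySem.List.pyGetD (PySem.List.pyGetD board j []) i 0]
        else s) []]) [] =
    (List.range board.length).map (fun i => colStack board i 0) := by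
  rw [PySem.List.foldl_append_singleton_eq_map]
  rw [PySem.List.pyRange_zero_nat]
  rw [List.map_map]
  apply List.map_congr_left
  intro i hi
  simp only [Function.comp]
  have hrange : PySem.List.pyRange ((board.length : Int) - 1) (-1) (-1) =
      (((List.range board.length).reverse).map (fun (j : Nat) => (j : Int))) := by
    rw [PySem.List.pyRange_neg_one]
    have hlen : ((board.length : Int) - 1 - (-1)).toNat = board.length := by omega
    rw [hlen]
    apply List.ext_getElem (by simp)
    intro k h1 h2
    have hk : k < board.length := by simpa using h1
    simp only [List.getElem_map, List.getElem_reverse, List.getElem_range, List.length_range]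
    omega
  rw [hrange, fold_rows board i]
  unfold colStack
  rw [List.filter_reverse, List.map_reverse, List.map_reverse]
  simp

-- invariant tying A's remaining bucket to B's pointers
def StInv (board : List (List Int)) (bucket : List (List Int)) (ptrs : List Int) : Prop :=
  bucket.length = board.length ∧ ptrs.length = board.length ∧
  ∀ k, k < board.length → ∃ p : Nat, ptrs.getD k 0 = (p : Int) ∧ p ≤ board.length ∧
    bucket.getD k [] = colStack board k p

-- full relation between the two loop states
def ABRel (board : List (List Int)) (sA : List (List Int) × List Int × Int)
    (sB : List Int × List Int × Int) : Prop :=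
  StInv board sA.1 sB.1 ∧ sA.2.1 = sB.2.1 ∧ sB.2.2 = sA.2.2 * 2

lemma step_rel_pos (board : List (List Int)) (sA : List (List Int) × List Int × Int)
    (sB : List Int × List Int × Int) (m : Int) (hm1 : 1 ≤ m)
    (hm2 : m ≤ (board.length : Int)) (hrel : ABRel board sA sB) :
    ABRel board (stepA sA m) (stepB board sB m) := by
  obtain ⟨⟨hlb, hlp, hk⟩, hstack, hres⟩ := hrel
  have hc : (m - 1).toNat < board.length := by omega
  set cN : Nat := (m - 1).toNat with hcN
  have hmc : m - 1 = (cN : Int) := by omega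
  obtain ⟨p, hpeq, hple, hcol⟩ := hk cN hc
  have hcolA : PySem.List.pyGetD sA.1 ((cN : Int)) [] = colStack board cN p := by
    rw [PySem.List.pyGetD_natCast]; exact hcol
  have hptrB : PySem.List.pyGetD sB.1 ((cN : Int)) 0 = (p : Int) := by
    rw [PySem.List.pyGetD_natCast]; exact hpeq
  rcases scan_spec board cN board.length p (by omega) hple with
    ⟨hscan, hempty⟩ | ⟨k, hscan, hpk, hkn, hcell, hdec⟩
  · -- column exhausted: both sides leave their state unchanged
    have hA : stepA sA m = sA := by
      simp only [stepA]
      rw [hmc, hcolA, hempty]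
      simp
    have hB : stepB board sB m = sB := by
      simp only [stepB]
      rw [hmc, hptrB, hscan]
      simp
    rw [hA, hB]; exact ⟨⟨hlb, hlp, hk⟩, hstack, hres⟩
  · -- a piece at row k is grabbed by both sides
    have hklt : ((k : Int)) < (board.length : Int) := by exact_mod_cast hkn
    have hitem : PySem.List.pyGetD (colStack board cN (k + 1) ++ [cell board k cN]) (-1) 0 =
        cell board k cN := PySem.List.pyGetD_neg_one_append_singleton _ _ _
    have hbitem : PySem.List.pyGetD (PySem.List.pyGetD board ((k : Int)) []) ((cN : Int)) 0 =
        cell board k cN := by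
      simp [cell]
    have hinv' : StInv board (sA.1.set cN (colStack board cN (k + 1)))
        (sB.1.set cN ((k : Int) + 1)) := by
      refine ⟨by simp [hlb], by simp [hlp], ?_⟩
      intro k' hk'
      by_cases hkc : k' = cN
      · subst hkc
        refine ⟨k + 1, ?_, by omega, ?_⟩
        · simp only [List.getD, List.getElem?_set_self (by omega : cN < sB.1.length),
            Option.getD_some]
          push_cast
          ring
        · simp [List.getD, List.getElem?_set_self (by omega : cN < sA.1.length)]
      · obtain ⟨p', h1, h2, h3⟩ := hk k' hk'
        refine ⟨p', ?_, h2, ?_⟩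
        · simpa [List.getD, List.getElem?_set_ne (by omega : cN ≠ k')] using h1
        · simpa [List.getD, List.getElem?_set_ne (by omega : cN ≠ k')] using h3
    have hA : stepA sA m =
        (sA.1.set cN (colStack board cN (k + 1)),
          (if sA.2.1.length = 0 ∨ PySem.List.pyGetD sA.2.1 (-1) 0 ≠ cell board k cN then
            sA.2.1 ++ [cell board k cN] else sA.2.1.dropLast),
          (if sA.2.1.length = 0 ∨ PySem.List.pyGetD sA.2.1 (-1) 0 ≠ cell board k cN then
            sA.2.2 else sA.2.2 + 1)) := by
      simp only [stepA]
      rw [hmc, hcolA, hdec, hitem]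
      have hne : (colStack board cN (k + 1) ++ [cell board k cN]).length ≠ 0 := by simp
      rw [if_pos hne]
      simp only [PySem.List.pySetD_natCast, List.dropLast_concat]
      by_cases hcond : sA.2.1.length = 0 ∨ PySem.List.pyGetD sA.2.1 (-1) 0 ≠ cell board k cN
      · rw [if_pos hcond, if_pos hcond, if_pos hcond]
      · rw [if_neg hcond, if_neg hcond, if_neg hcond]
        push Not at hcond
        rw [if_pos hcond.2]
    have hB : stepB board sB m =
        (sB.1.set cN ((k : Int) + 1),
          (if sB.2.1 ≠ [] ∧ PySem.List.pyGetD sB.2.1 (-1) 0 = cell board k cN then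
            sB.2.1.dropLast else sB.2.1 ++ [cell board k cN]),
          (if sB.2.1 ≠ [] ∧ PySem.List.pyGetD sB.2.1 (-1) 0 = cell board k cN then
            sB.2.2 + 2 else sB.2.2)) := by
      simp only [stepB]
      rw [hmc, hptrB, hscan, if_pos hklt, hbitem]
      simp only [PySem.List.pySetD_natCast]
      by_cases hcond : sB.2.1 ≠ [] ∧ PySem.List.pyGetD sB.2.1 (-1) 0 = cell board k cN
      · rw [if_pos hcond, if_pos hcond, if_pos hcond]
      · rw [if_neg hcond, if_neg hcond, if_neg hcond]
    have hSB : sB.2.1 = sA.2.1 := hstack.symm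
    rw [hA, hB, hSB]
    by_cases hs : sA.2.1 = []
    · have c1 : sA.2.1.length = 0 ∨ PySem.List.pyGetD sA.2.1 (-1) 0 ≠ cell board k cN :=
        Or.inl (by simp [hs])
      have c2 : ¬(sA.2.1 ≠ [] ∧ PySem.List.pyGetD sA.2.1 (-1) 0 = cell board k cN) := by
        simp [hs]
      exact ⟨hinv', by dsimp only; rw [if_pos c1, if_neg c2],
        by dsimp only; rw [if_pos c1, if_neg c2, hres]⟩
    · by_cases heq : PySem.List.pyGetD sA.2.1 (-1) 0 = cell board k cN
      · have c1 : ¬(sA.2.1.length = 0 ∨ PySem.List.pyGetD sA.2.1 (-1) 0 ≠ cell board k cN) := by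
          rintro (h | h)
          · exact hs (by simpa using h)
          · exact h heq
        have c2 : sA.2.1 ≠ [] ∧ PySem.List.pyGetD sA.2.1 (-1) 0 = cell board k cN := ⟨hs, heq⟩
        refine ⟨hinv', by dsimp only; rw [if_neg c1, if_pos c2], ?_⟩
        dsimp only
        rw [if_neg c1, if_pos c2, hres]
        ring
      · have c1 : sA.2.1.length = 0 ∨ PySem.List.pyGetD sA.2.1 (-1) 0 ≠ cell board k cN :=
          Or.inr heq
        have c2 : ¬(sA.2.1 ≠ [] ∧ PySem.List.pyGetD sA.2.1 (-1) 0 = cell board k cN) :=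
          fun h => heq h.2
        exact ⟨hinv', by dsimp only; rw [if_pos c1, if_neg c2],
          by dsimp only; rw [if_pos c1, if_neg c2, hres]⟩

-- Python's negative-index wraparound: index i and i + len address the same slot
lemma pyIdx_shift (n : Nat) (i : Int) (h1 : -(n : Int) ≤ i) (h2 : i < 0) :
    PySem.List.pyIdx? n (i + (n : Int)) = PySem.List.pyIdx? n i := by
  simp only [PySem.List.pyIdx?]
  rw [if_pos (by omega : (0:Int) ≤ i + n), if_pos (by omega : i + (n:Int) < n),
    if_neg (by omega : ¬ (0:Int) ≤ i), if_pos h1]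
  congr 1
  omega

lemma pyGetD_shift {α : Type} (xs : List α) (i : Int) (d : α) (h1 : -(xs.length : Int) ≤ i)
    (h2 : i < 0) : PySem.List.pyGetD xs (i + (xs.length : Int)) d = PySem.List.pyGetD xs i d := by
  simp only [PySem.List.pyGetD, PySem.List.pyGet?, pyIdx_shift xs.length i h1 h2]

lemma pySetD_shift {α : Type} (xs : List α) (i : Int) (v : α) (h1 : -(xs.length : Int) ≤ i)
    (h2 : i < 0) : PySem.List.pySetD xs (i + (xs.length : Int)) v = PySem.List.pySetD xs i v := by
  simp only [PySem.List.pySetD, PySem.List.pySet?, pyIdx_shift xs.length i h1 h2]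

-- on a square board, the cell read of Source B is invariant under that wraparound, whatever row
lemma read_shift (board : List (List Int)) (c : Int) (hc1 : -(board.length : Int) ≤ c)
    (hc2 : c < 0) (hsq : ∀ row ∈ board, row.length = board.length) (r : Int) :
    PySem.List.pyGetD (PySem.List.pyGetD board r []) (c + (board.length : Int)) 0 =
      PySem.List.pyGetD (PySem.List.pyGetD board r []) c 0 := by
  rcases h : PySem.List.pyGet? board r with _ | row
  · have hrow : PySem.List.pyGetD board r [] = [] := by
      simp [PySem.List.pyGetD, h]
    rw [hrow]
    simp only [PySem.List.pyGetD, PySem.List.pyGet?, PySem.List.pyIdx?]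
    split_ifs <;> simp_all
  · have hrow : PySem.List.pyGetD board r [] = row := by
      simp [PySem.List.pyGetD, h]
    have hmem : row ∈ board := by
      apply PySem.List.mem_of_pyGet?_eq_some (i := r)
      exact h
    have hlen : row.length = board.length := hsq row hmem
    rw [hrow, ← hlen]
    exact pyGetD_shift row c 0 (by omega) hc2

lemma scan_shift (board : List (List Int)) (c nn : Int) (hc1 : -(board.length : Int) ≤ c)
    (hc2 : c < 0) (hsq : ∀ row ∈ board, row.length = board.length) :
    ∀ (fuel : Nat) (r : Int),
      scanB board (c + (board.length : Int)) nn fuel r = scanB board c nn fuel r := by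
  intro fuel
  induction fuel with
  | zero => intro r; rfl
  | succ fuel ih =>
    intro r
    simp only [scanB]
    rw [read_shift board c hc1 hc2 hsq r, ih (r + 1)]

lemma stepA_shift (board : List (List Int)) (sA : List (List Int) × List Int × Int) (m : Int)
    (hlb : sA.1.length = board.length) (h1 : -(board.length : Int) ≤ m - 1) (h2 : m - 1 < 0) :
    stepA sA (m + (board.length : Int)) = stepA sA m := by
  simp only [stepA]
  have hidx : m + (board.length : Int) - 1 = (m - 1) + (sA.1.length : Int) := by
    rw [hlb]; ring
  rw [hidx, pyGetD_shift sA.1 (m - 1) [] (by omega) h2, pySetD_shift sA.1 (m - 1) _ (by omega) h2]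

lemma stepB_shift (board : List (List Int)) (sB : List Int × List Int × Int) (m : Int)
    (hlp : sB.1.length = board.length) (h1 : -(board.length : Int) ≤ m - 1) (h2 : m - 1 < 0)
    (hsq : ∀ row ∈ board, row.length = board.length) :
    stepB board sB (m + (board.length : Int)) = stepB board sB m := by
  simp only [stepB]
  have hidx : m + (board.length : Int) - 1 = (m - 1) + (board.length : Int) := by ring
  have hidx' : m + (board.length : Int) - 1 = (m - 1) + (sB.1.length : Int) := by
    rw [hlp]; ring
  rw [hidx]
  rw [scan_shift board (m - 1) (board.length : Int) h1 h2 hsq]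
  rw [show (m - 1) + (board.length : Int) = (m - 1) + (sB.1.length : Int) by rw [hlp]]
  rw [pyGetD_shift sB.1 (m - 1) 0 (by omega) h2, pySetD_shift sB.1 (m - 1) _ (by omega) h2]
  rw [show (m - 1) + (sB.1.length : Int) = (m - 1) + (board.length : Int) by rw [hlp]]
  rw [fun r => read_shift board (m - 1) h1 h2 hsq r]

lemma step_rel (board : List (List Int)) (sA : List (List Int) × List Int × Int)
    (sB : List Int × List Int × Int) (m : Int) (hm1 : 1 - (board.length : Int) ≤ m)
    (hm2 : m ≤ (board.length : Int))
    (hsq : m ≤ 0 → ∀ row ∈ board, row.length = board.length)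
    (hrel : ABRel board sA sB) :
    ABRel board (stepA sA m) (stepB board sB m) := by
  by_cases hpos : 1 ≤ m
  · exact step_rel_pos board sA sB m hpos hm2 hrel
  · have hsq' := hsq (by omega)
    have hA := stepA_shift board sA m hrel.1.1 (by omega) (by omega)
    have hB := stepB_shift board sB m hrel.1.2.1 (by omega) (by omega) hsq'
    rw [← hA, ← hB]
    exact step_rel_pos board sA sB (m + (board.length : Int)) (by omega) (by omega) hrel

lemma fold_rel (board : List (List Int)) :
    ∀ (moves : List Int) (sA : List (List Int) × List Int × Int)
      (sB : List Int × List Int × Int),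
      (∀ m ∈ moves, 1 - (board.length : Int) ≤ m ∧ m ≤ (board.length : Int)) →
      (∀ m ∈ moves, m ≤ 0 → ∀ row ∈ board, row.length = board.length) → ABRel board sA sB →
      ABRel board (moves.foldl stepA sA) (moves.foldl (stepB board) sB) := by
  intro moves
  induction moves with
  | nil => intro sA sB _ _ h; simpa using h
  | cons m rest ih =>
    intro sA sB hmv hsq h
    simp only [List.foldl_cons]
    exact ih _ _ (fun x hx => hmv x (List.mem_cons_of_mem _ hx))
      (fun x hx => hsq x (List.mem_cons_of_mem _ hx))
      (step_rel board sA sB m (hmv m (List.mem_cons_self)).1 (hmv m (List.mem_cons_self)).2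
        (hsq m (List.mem_cons_self)) h)

-- ===== VERDICT (by name: the statement is the Claim_ definition above) =====
theorem solution_spec : Claim_equal_solution := by
  intro board moves _ hpre
  unfold Spec_solution solution solution_alt
  simp only [bucket_eq board]
  have hrel := fold_rel board moves
    ((List.range board.length).map (fun i => colStack board i 0), ([], 0))
    (List.replicate board.length (0 : Int), ([], 0)) hpre.2.1 hpre.2.2 ?_
  · rcases hrel with ⟨_, _, hres⟩
    omega
  · refine ⟨⟨by simp, by simp, ?_⟩, rfl, by ring⟩
    intro k hk
    refine ⟨0, ?_, Nat.zero_le _, ?_⟩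
    · simp [List.getD, hk]
    · simp [List.getD, hk]
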